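-- pv_equiv track=rewrite | github.com/IvanYAIT/PythonTasks | Module30_Tasks/Task3/task3.py | can_be_poly
-- ===== SOURCE A (Python) =====
-- def can_be_poly(string : str):
--     if len(string) <= 1:
--         return False
--
--     letters_count = {}
--     for letter in string:
--         if letters_count.get(letter):
--             letters_count[letter] += 1
--         else:
--             letters_count[letter] = 1
--
--     countere = 0
--     for value in letters_count.values():
--         if value % 2 != 0:
--             countere += 1
--         if countere > 1:
--             return False
--     return True
-- ===== SOURCE B (Python) =====
-- def can_be_poly(string: str):
--     if len(string) <= 1:
--         return False
--     # pair cancellation: repeatedly match the front char with a later twin;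
--     # chars left unmatched are exactly those occurring an odd number of times
--     pool = list(string)
--     unpaired = []
--     while pool:
--         h = pool.pop(0)
--         if h in pool:
--             pool.remove(h)
--         else:
--             unpaired.append(h)
--     return len(unpaired) <= 1
-- ===== Notes on version B (the rewrite author's own statement) =====
-- stated objective: alternative
-- what changed: Replaces frequency counting (dict build + odd-value scan) with iterative pair cancellation: pop the front char, delete its later twin if one exists, otherwise keep it as unpaired, and check at most one char stays unpaired.
import Mathlib
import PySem

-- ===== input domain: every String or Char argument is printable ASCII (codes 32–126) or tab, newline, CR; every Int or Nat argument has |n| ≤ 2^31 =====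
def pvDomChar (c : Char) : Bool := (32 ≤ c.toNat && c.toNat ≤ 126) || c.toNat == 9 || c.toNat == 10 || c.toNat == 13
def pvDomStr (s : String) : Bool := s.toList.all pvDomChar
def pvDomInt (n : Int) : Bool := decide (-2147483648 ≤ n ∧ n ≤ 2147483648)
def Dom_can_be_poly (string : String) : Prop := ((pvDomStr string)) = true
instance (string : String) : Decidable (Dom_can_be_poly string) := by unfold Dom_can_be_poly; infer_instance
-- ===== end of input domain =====

-- B replaces A's frequency-dict build plus odd-count scan by iterative pair cancellation
-- (pop front char, delete its later twin if any, else keep it unpaired); alternative decomposition, not faster.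

-- ===== PORT A =====
-- the counting loop: `if letters_count.get(letter):` is truthy iff the stored value is nonzero
-- (`letters_count[letter] += 1` is guarded by that test, so `getD … 0` reads the existing value exactly)
def can_be_poly_dict (l : List Char) : PySem.Dict Char Int :=
  l.foldl (fun d c =>
    if d.getD c 0 ≠ 0 then d.insert c (d.getD c 0 + 1)
    else d.insert c 1) PySem.Dict.empty

-- the second loop, with its early `return False` when countere > 1
def can_be_poly_loop : List Int → Int → Bool
  | [], _ => true
  | v :: rest, countere =>
    let countere' := if PySem.Int.mod v 2 ≠ 0 then countere + 1 else countere
    if countere' > 1 then false else can_be_poly_loop rest countere'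

def can_be_poly (string : String) : Bool :=
  if PySem.Str.len string ≤ 1 then false
  else can_be_poly_loop (can_be_poly_dict string.toList).values 0

-- ===== PORT B =====
-- B's `while pool:` loop: `pool.pop(0)` is the head, and `pool.remove(h)` under the
-- `h in pool` guard removes the first later occurrence, i.e. `pool.erase h`
-- (PySem.List.remove?_eq_some_erase); `unpaired.append(h)` is `acc ++ [h]`.
def can_be_poly_stripLoop : List Char → List Char → List Char
  | [], acc => acc
  | h :: pool, acc =>
    if h ∈ pool then can_be_poly_stripLoop (pool.erase h) acc
    else can_be_poly_stripLoop pool (acc ++ [h])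
termination_by pool _ => pool.length
decreasing_by
  all_goals simp_all [List.length_erase_of_mem]

def can_be_poly_alt (string : String) : Bool :=
  if PySem.Str.len string ≤ 1 then false
  else decide ((can_be_poly_stripLoop string.toList []).length ≤ 1)

-- ===== PRECONDITION & SPEC =====
def Spec_can_be_poly (string : String) (out : Bool) : Prop := out = can_be_poly_alt string
instance (string : String) (out : Bool) : Decidable (Spec_can_be_poly string out) := by unfold Spec_can_be_poly; infer_instance

-- ===== CLAIM (what is proved, stated in full; the proofs are below) =====
def Claim_equal_can_be_poly : Prop := ∀ (string : String), Dom_can_be_poly string → Spec_can_be_poly string (can_be_poly string)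

-- ===== LEMMAS AND PROOFS =====

-- A's counting fold is Counter(string): its stored values are always positive, so the truthiness test always takes the increment branch for present keys
theorem dict_eq_counter_aux (l : List Char) (d : PySem.Dict Char Int)
    (h : ∀ c v, d.get? c = some v → 0 < v) :
    l.foldl (fun d c =>
      if d.getD c 0 ≠ 0 then d.insert c (d.getD c 0 + 1)
      else d.insert c 1) d
    = l.foldl (fun d c => d.insert c (d.getD c 0 + 1)) d := by
  induction l generalizing d with
  | nil => rfl
  | cons a rest ih =>
    simp only [List.foldl_cons]
    have hstep : (if d.getD a 0 ≠ 0 then d.insert a (d.getD a 0 + 1) else d.insert a 1)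
        = d.insert a (d.getD a 0 + 1) := by
      rcases hv : d.get? a with _ | v
      · simp [PySem.Dict.getD, hv]
      · have := h a v hv
        simp [PySem.Dict.getD, hv]
        omega
    rw [hstep]
    apply ih
    intro c v hv
    rw [PySem.Dict.get?_insert] at hv
    split at hv
    · rcases hv' : d.get? a with _ | w
      · simp [PySem.Dict.getD, hv'] at hv; omega
      · have := h a w hv'
        simp [PySem.Dict.getD, hv'] at hv; omega
    · exact h c v hv

theorem dict_eq_counter (l : List Char) :
    can_be_poly_dict l = PySem.Dict.counter l := by
  rw [can_be_poly_dict, dict_eq_counter_aux l PySem.Dict.empty (by intro c v hv; simp [PySem.Dict.empty, PySem.Dict.get?] at hv)]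
  exact PySem.Dict.foldl_insert_getD_add_one_eq_counter l

-- the second loop counts odd values, capped at 1
theorem loop_eq_countP (vals : List Int) (cnt : Int) (h0 : 0 ≤ cnt) (h1 : cnt ≤ 1) :
    can_be_poly_loop vals cnt
      = decide (cnt + (vals.countP (fun v => PySem.Int.mod v 2 ≠ 0) : Int) ≤ 1) := by
  induction vals generalizing cnt with
  | nil =>
    simp only [can_be_poly_loop, List.countP_nil, Nat.cast_zero, add_zero]
    exact (decide_eq_true h1).symm
  | cons v rest ih =>
    simp only [can_be_poly_loop, List.countP_cons]
    by_cases hv : PySem.Int.mod v 2 ≠ 0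
    · have hrw : (if PySem.Int.mod v 2 ≠ 0 then cnt + 1 else cnt) = cnt + 1 := if_pos hv
      have hd : decide (PySem.Int.mod v 2 ≠ 0) = true := decide_eq_true hv
      simp only [hrw, hd, if_true]
      by_cases hb : cnt + 1 > 1
      · rw [if_pos hb]
        symm
        rw [decide_eq_false_iff_not]
        push_cast
        omega
      · rw [if_neg hb, ih (cnt + 1) (by omega) (by omega)]
        simp only [decide_eq_decide]
        push_cast
        omega
    · have hrw : (if PySem.Int.mod v 2 ≠ 0 then cnt + 1 else cnt) = cnt := if_neg hv
      have hd : decide (PySem.Int.mod v 2 ≠ 0) = false := decide_eq_false hv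
      simp only [hrw, hd, Bool.false_eq_true, if_false, add_zero]
      rw [if_neg (show ¬ cnt > 1 by omega), ih cnt h0 h1]

-- B's pair-cancellation loop: each char survives exactly (its count mod 2) times beyond acc
theorem stripLoop_count (pool acc : List Char) (c : Char) :
    (can_be_poly_stripLoop pool acc).count c = acc.count c + pool.count c % 2 := by
  induction pool, acc using can_be_poly_stripLoop.induct with
  | case1 acc => simp [can_be_poly_stripLoop]
  | case2 h pool acc hmem ih =>
    rw [can_be_poly_stripLoop, if_pos hmem, ih]
    have hpos : 0 < pool.count h := List.count_pos_iff.mpr hmem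
    by_cases hc : c = h
    · subst hc
      rw [List.count_erase_self, List.count_cons_self]
      omega
    · rw [List.count_erase_of_ne hc]
      have hhc : ¬ h = c := fun hh => hc hh.symm
      simp [hhc]
  | case3 h pool acc hmem ih =>
    rw [can_be_poly_stripLoop, if_neg hmem, ih]
    have h0 : pool.count h = 0 := List.count_eq_zero.mpr hmem
    by_cases hc : c = h
    · subst hc
      rw [List.count_append, List.count_singleton, List.count_cons_self]
      simp [h0]
    · rw [List.count_append]
      have hhc : ¬ h = c := fun hh => hc hh.symm
      simp [hhc]

theorem strip_count (l : List Char) (c : Char) :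
    (can_be_poly_stripLoop l []).count c = l.count c % 2 := by
  rw [stripLoop_count]; simp

theorem strip_nodup (l : List Char) : (can_be_poly_stripLoop l []).Nodup := by
  rw [List.nodup_iff_count_le_one]
  intro c
  rw [strip_count]
  omega

theorem strip_mem (l : List Char) (c : Char) :
    c ∈ can_be_poly_stripLoop l [] ↔ l.count c % 2 = 1 := by
  rw [← List.count_pos_iff, strip_count]
  omega

-- two nodup lists with the same members have the same length
theorem length_eq_of_nodup_of_mem_iff {l₁ l₂ : List Char}
    (h₁ : l₁.Nodup) (h₂ : l₂.Nodup) (h : ∀ c, c ∈ l₁ ↔ c ∈ l₂) :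
    l₁.length = l₂.length := by
  rw [← List.toFinset_card_of_nodup h₁, ← List.toFinset_card_of_nodup h₂]
  congr 1
  ext c
  simp [h c]

theorem counts_agree (l : List Char) :
    ((PySem.Dict.counter l).values.countP (fun v => PySem.Int.mod v 2 ≠ 0))
      = (can_be_poly_stripLoop l []).length := by
  have hvals : (PySem.Dict.counter l).values
      = (PySem.Set.ofList l).map (fun k => ((l.count k : Nat) : Int)) := by
    have := PySem.Dict.items_counter l
    simp only [PySem.Dict.values, this, List.map_map]
    rfl
  rw [hvals, List.countP_map]
  have hpred : ∀ c : Char,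
      ((fun v => decide (PySem.Int.mod v 2 ≠ 0)) ∘ fun k => ((l.count k : Nat) : Int)) c
        = decide (l.count c % 2 = 1) := by
    intro c
    simp only [Function.comp]
    rw [show (2 : Int) = ((2 : Nat) : Int) from rfl, PySem.Int.mod_natCast]
    simp only [ne_eq, Nat.cast_eq_zero]
    congr 1
    simp only [eq_iff_iff]
    omega
  rw [List.countP_congr (fun c _ => by rw [hpred c])]
  rw [List.countP_eq_length_filter]
  apply length_eq_of_nodup_of_mem_iff
  · exact (PySem.Set.nodup_ofList l).filter _
  · exact strip_nodup l
  · intro c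
    rw [List.mem_filter, PySem.Set.mem_ofList, strip_mem]
    constructor
    · rintro ⟨-, h⟩; exact of_decide_eq_true h
    · intro h
      refine ⟨?_, decide_eq_true h⟩
      have : l.count c ≠ 0 := by omega
      exact List.count_pos_iff.mp (Nat.pos_of_ne_zero this)

-- ===== VERDICT (by name: the statement is the Claim_ definition above) =====
theorem can_be_poly_spec : Claim_equal_can_be_poly := by
  intro s _
  unfold Spec_can_be_poly can_be_poly can_be_poly_alt
  by_cases hlen : PySem.Str.len s ≤ 1
  · rw [if_pos hlen, if_pos hlen]
  · rw [if_neg hlen, if_neg hlen]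
    rw [dict_eq_counter, loop_eq_countP _ 0 le_rfl (by omega), counts_agree s.toList]
    simp
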